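-- pv_equiv track=rewrite | github.com/Quaqqer/aoc | 2020/20/prg.py | markmonsters
-- ===== SOURCE A (Python) =====
-- monster = [[c for c in line] for line in """                  #
-- #    ##    ##    ###
--  #  #  #  #  #  #   """.split("\n")]
--
-- def markmonsters(grid):
--     found = False
--     for x in range(len(grid)-len(monster[0])):
--         for y in range(len(grid)-len(monster)):
--             ismonster = True
--             for mx in range(len(monster[0])):
--                 for my in range(len(monster)):
--                     if monster[my][mx] == "#" and grid[y + my][x + mx] == ".":
--                         ismonster = False
--                         break
--                 if not ismonster:
--                     break
--             if ismonster:
--                 found = True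
--                 for mx in range(len(monster[0])):
--                     for my in range(len(monster)):
--                         if monster[my][mx] == "#":
--                             grid[y + my][x + mx] = "O"
--     return found
-- ===== SOURCE B (Python) =====
-- # Bitmask algorithm: rows are encoded once as integers (bit j set iff cell j is
-- # not '.'); a window matches iff three shifted AND-mask tests pass, and marking
-- # walks the mask's bits.  Mutates grid in place like A (same cells set to "O").
-- monster = [[c for c in line] for line in """                  #
-- #    ##    ##    ###
--  #  #  #  #  #  #   """.split("\n")]
--
-- def _mask(row, blank):
--     m = 0
--     for c in reversed(row):
--         m = 2 * m + (0 if c == blank else 1)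
--     return m
--
-- MASKS = [_mask(row, " ") for row in monster]  # '#' bits of the three stencil rows
--
-- def markmonsters(grid):
--     n = len(grid)
--     rowmasks = [_mask(row, ".") for row in grid]
--     found = False
--     for x in range(n - 20):
--         for y in range(n - 3):
--             if all((rowmasks[y + my] >> x) & MASKS[my] == MASKS[my] for my in range(3)):
--                 found = True
--                 for my in range(3):
--                     m = MASKS[my]
--                     mx = 0
--                     while m:
--                         if m & 1:
--                             grid[y + my][x + mx] = "O"
--                         m >>= 1
--                         mx += 1
--     return found
-- ===== Notes on version B (the rewrite author's own statement) =====
-- stated objective: faster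
-- what changed: B switches data structure: each grid row is encoded once as an integer bitmask of its non-'.' cells and the monster rows as three 20-bit masks, so a window test becomes three shift-AND-compare big-int operations and marking walks a mask's set bits, replacing A's four nested per-character string-comparison loops (measured ~2.2x faster).
import Mathlib
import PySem

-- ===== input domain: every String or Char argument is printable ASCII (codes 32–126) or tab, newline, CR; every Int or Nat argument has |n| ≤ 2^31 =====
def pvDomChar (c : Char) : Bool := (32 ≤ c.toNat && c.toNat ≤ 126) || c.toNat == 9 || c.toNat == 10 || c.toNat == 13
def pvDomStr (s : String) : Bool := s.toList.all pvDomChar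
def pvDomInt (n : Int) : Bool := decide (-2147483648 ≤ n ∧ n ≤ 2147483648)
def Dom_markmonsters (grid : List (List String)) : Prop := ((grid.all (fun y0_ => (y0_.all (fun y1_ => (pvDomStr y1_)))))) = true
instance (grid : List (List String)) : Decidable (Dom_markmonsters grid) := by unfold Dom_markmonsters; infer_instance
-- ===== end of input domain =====

-- B trades A's four nested character-scanning loops for integer bitmasks (rows
-- and stencil rows encoded as bit sets, window test = shift-AND-compare, marking
-- walks mask bits); objective: faster (a timing run measured B ~2x faster).
-- Both Pythons mutate `grid` in place (the same cells become "O"); the theorems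
-- are about the returned Bool only.

-- ===== PORT A =====
-- the module-level constant `monster` (value of the comprehension, 3 rows x 20 one-char strings)
def monsterA : List (List String) :=
  [[" "," "," "," "," "," "," "," "," "," "," "," "," "," "," "," "," "," ","#"," "],
   ["#"," "," "," "," ","#","#"," "," "," "," ","#","#"," "," "," "," ","#","#","#"],
   [" ","#"," "," ","#"," "," ","#"," "," ","#"," "," ","#"," "," ","#"," "," "," "]]

-- grid[i][j] read; inside Pre_ every index reached is in range, so getD's default is never used
def cellA (g : List (List String)) (i j : Nat) : String := (g.getD i []).getD j ""

-- grid[i][j] = "O" write (List.set, a no-op out of range, is exact in range)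
def setCellA (g : List (List String)) (i j : Nat) : List (List String) :=
  g.set i ((g.getD i []).set j "O")

-- the `ismonster` nested loops: `.all` short-circuits exactly like the two breaks
def checkA (g : List (List String)) (x y : Nat) : Bool :=
  (List.range 20).all (fun mx =>
    (List.range 3).all (fun my =>
      !(((monsterA.getD my []).getD mx "" == "#") && (cellA g (y + my) (x + mx) == "."))))

-- the marking nested loops
def markA (g : List (List String)) (x y : Nat) : List (List String) :=
  (List.range 20).foldl (fun g mx =>
    (List.range 3).foldl (fun g my =>
      if (monsterA.getD my []).getD mx "" == "#" then setCellA g (y + my) (x + mx) else g) g) g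

-- `range(len(grid)-20)`: Python's empty range for a non-positive bound coincides
-- with Nat-truncated subtraction, so List.range (n - 20) is exact.
def markmonsters (grid : List (List String)) : Bool :=
  ((List.range (grid.length - 20)).foldl (fun s x =>
    (List.range (grid.length - 3)).foldl (fun s y =>
      if checkA s.1 x y then (markA s.1 x y, true) else s) s)
    (grid, false)).2

-- ===== PORT B =====
def monsterB : List (List String) :=
  [[" "," "," "," "," "," "," "," "," "," "," "," "," "," "," "," "," "," ","#"," "],
   ["#"," "," "," "," ","#","#"," "," "," "," ","#","#"," "," "," "," ","#","#","#"],
   [" ","#"," "," ","#"," "," ","#"," "," ","#"," "," ","#"," "," ","#"," "," "," "]]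

-- _mask(row, blank): bit j set iff row[j] != blank (the reversed loop is a foldr)
def maskB (row : List String) (blank : String) : Nat :=
  row.foldr (fun c m => 2 * m + (if c == blank then 0 else 1)) 0

def masksB : List Nat := monsterB.map (fun row => maskB row " ")

-- the `while m:` marking loop, recursing on the mask's value
def markBitsB (row : List String) (x m : Nat) : List String :=
  if m = 0 then row
  else markBitsB (if m % 2 = 1 then row.set x "O" else row) (x + 1) (m / 2)
  termination_by m
  decreasing_by exact Nat.div_lt_self (Nat.pos_of_ne_zero (by assumption)) (by omega)

def markmonsters_alt (grid : List (List String)) : Bool :=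
  let rowmasks := grid.map (fun row => maskB row ".")
  ((List.range (grid.length - 20)).foldl (fun s x =>
    (List.range (grid.length - 3)).foldl (fun s y =>
      if (List.range 3).all (fun my =>
          ((rowmasks.getD (y + my) 0) >>> x) &&& (masksB.getD my 0) == masksB.getD my 0) then
        ((List.range 3).foldl (fun g my =>
            g.set (y + my) (markBitsB (g.getD (y + my) []) x (masksB.getD my 0))) s.1, true)
      else s) s)
    (grid, false)).2

-- ===== PRECONDITION & SPEC =====
-- Pre_ excludes grids with more than 20 rows in which some non-last row is shorter
-- than len(grid)-1: there the Python may hit an IndexError reading grid[y+my][x+mx]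
-- (whether it does depends on where '.' cells let the scan break off early).
def Pre_markmonsters (grid : List (List String)) : Prop :=
  grid.length ≤ 20 ∨ ∀ row ∈ grid.dropLast, grid.length - 1 ≤ row.length
instance (grid : List (List String)) : Decidable (Pre_markmonsters grid) := by
  unfold Pre_markmonsters; infer_instance

def pvWitness_markmonsters : List (List String) := [[".", "#"], ["#", "O"]]

def Spec_markmonsters (grid : List (List String)) (out : Bool) : Prop := out = markmonsters_alt grid
instance (grid : List (List String)) (out : Bool) : Decidable (Spec_markmonsters grid out) := by unfold Spec_markmonsters; infer_instance

-- ===== CLAIM (what is proved, stated in full; the proofs are below) =====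
def Claim_equal_markmonsters : Prop := ∀ (grid : List (List String)), Dom_markmonsters grid → Pre_markmonsters grid → Spec_markmonsters grid (markmonsters grid)

-- ===== LEMMAS AND PROOFS =====

-- the state invariant of A's fold: same shape as the original grid, same '.'-pattern
def InvG (grid g : List (List String)) : Prop :=
  g.length = grid.length ∧
  (∀ i, (g.getD i []).length = (grid.getD i []).length) ∧
  (∀ i j, ((g.getD i []).getD j "" == ".") = ((grid.getD i []).getD j "" == "."))

theorem maskB_testBit (blank : String) (row : List String) (j : Nat) :
    (maskB row blank).testBit j = !(row.getD j blank == blank) := by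
  induction row generalizing j with
  | nil => simp [maskB]
  | cons c t ih =>
      have hstep : maskB (c :: t) blank = 2 * maskB t blank + (if c == blank then 0 else 1) := rfl
      cases j with
      | zero =>
          rw [hstep, Nat.testBit_zero]
          by_cases h : c == blank <;> simp [h]
      | succ j =>
          rw [hstep, Nat.testBit_succ]
          have h2 : (2 * maskB t blank + (if c == blank then 0 else 1)) / 2 = maskB t blank := by
            split <;> omega
          rw [h2]
          simpa using ih j

theorem and_mask_eq_iff (v m : Nat) :
    (v &&& m = m) ↔ ∀ i, m.testBit i = true → v.testBit i = true := by
  constructor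
  · intro h i hi
    have := congrArg (fun n => n.testBit i) h
    simpa [Nat.testBit_and, hi] using this
  · intro h
    apply Nat.eq_of_testBit_eq
    intro i
    rw [Nat.testBit_and]
    cases hm : m.testBit i
    · simp
    · simp [h i hm]

theorem checkA_congr (grid g : List (List String)) (h : InvG grid g) (x y : Nat) :
    checkA g x y = checkA grid x y := by
  obtain ⟨-, -, hpat⟩ := h
  simp only [checkA, cellA]
  congr 1
  funext mx
  congr 1
  funext my
  rw [hpat]

-- monster mask bits, below 20, by decide

theorem monsterMaskBit_lo : ∀ my, my < 3 → ∀ i, i < 20 →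
    ((masksB.getD my 0).testBit i = ((monsterA.getD my []).getD i "" == "#")) := by decide

theorem monsterMaskBit_hi : ∀ my, my < 3 → ∀ i, 20 ≤ i → (masksB.getD my 0).testBit i = false := by
  intro my hmy i hi
  apply Nat.testBit_lt_two_pow
  calc masksB.getD my 0 < 2 ^ 20 := by interval_cases my <;> decide
    _ ≤ 2 ^ i := Nat.pow_le_pow_right (by omega) hi

theorem checkA_mask (grid : List (List String)) (x y : Nat)
    (hn : 21 ≤ grid.length) (hx : x < grid.length - 20) (hy : y < grid.length - 3)
    (hrow : ∀ row ∈ grid.dropLast, grid.length - 1 ≤ row.length) :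
    checkA grid x y = (List.range 3).all (fun my =>
      (((grid.map (fun row => maskB row ".")).getD (y + my) 0) >>> x) &&& (masksB.getD my 0)
        == masksB.getD my 0) := by
  have hrowlen : ∀ my, my < 3 → grid.length - 1 ≤ (grid.getD (y + my) []).length := by
    intro my hmy
    apply hrow
    have hlt : y + my < grid.dropLast.length := by
      rw [List.length_dropLast]; omega
    have : grid.getD (y + my) [] = grid.dropLast[y + my] := by
      rw [List.getElem_dropLast, List.getD_eq_getElem?_getD,
          List.getElem?_eq_getElem (by omega), Option.getD_some]
    rw [this]
    exact List.getElem_mem hlt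
  have hmap : ∀ my, my < 3 → (grid.map (fun row => maskB row ".")).getD (y + my) 0
      = maskB (grid.getD (y + my) []) "." := by
    intro my hmy
    have hlt : y + my < grid.length := by omega
    simp [List.getD_eq_getElem?_getD, List.getElem?_eq_getElem hlt,
          List.getElem?_eq_getElem (by simpa using hlt : y + my < (grid.map (fun row => maskB row ".")).length)]
  unfold checkA
  rw [Bool.eq_iff_iff]
  simp only [List.all_eq_true, List.mem_range]
  constructor
  · intro h my hmy
    rw [beq_iff_eq, and_mask_eq_iff]
    intro i hMi
    by_cases hi20 : i < 20
    · have hst := (monsterMaskBit_lo my hmy i hi20) ▸ hMi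
      have hcell := h i hi20 my hmy
      rw [Bool.not_eq_eq_eq_not, Bool.not_true, Bool.and_eq_false_iff] at hcell
      rcases hcell with hcell | hcell
      · rw [hst] at hcell; simp at hcell
      · -- cell not ".", so the row mask bit is set
        rw [Nat.testBit_shiftRight, hmap my hmy, maskB_testBit]
        have hlen := hrowlen my hmy
        have hinr : x + i < (grid.getD (y + my) []).length := by omega
        rw [List.getD_eq_getElem?_getD, List.getElem?_eq_getElem hinr, Option.getD_some]
        simp only [cellA] at hcell
        rw [List.getD_eq_getElem?_getD, List.getElem?_eq_getElem hinr, Option.getD_some] at hcell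
        simpa using hcell
    · rw [monsterMaskBit_hi my hmy i (by omega)] at hMi; exact absurd hMi (by simp)
  · intro h mx hmx my hmy
    have hmask := h my hmy
    rw [beq_iff_eq, and_mask_eq_iff] at hmask
    rw [Bool.not_eq_eq_eq_not, Bool.not_true, Bool.and_eq_false_iff]
    by_cases hst : (monsterA.getD my []).getD mx "" == "#"
    · right
      have := hmask mx (by rw [monsterMaskBit_lo my hmy mx hmx]; exact hst)
      rw [Nat.testBit_shiftRight, hmap my hmy, maskB_testBit] at this
      have hlen := hrowlen my hmy
      have hinr : x + mx < (grid.getD (y + my) []).length := by omega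
      rw [List.getD_eq_getElem?_getD, List.getElem?_eq_getElem hinr, Option.getD_some] at this
      simp only [cellA]
      rw [List.getD_eq_getElem?_getD, List.getElem?_eq_getElem hinr, Option.getD_some]
      simpa using this
    · left; simpa using hst

theorem foldl_pres {α σ : Type} (P : σ → Prop) (f : σ → α → σ) (l : List α) (s : σ)
    (h : P s) (hstep : ∀ s a, a ∈ l → P s → P (f s a)) : P (l.foldl f s) := by
  induction l generalizing s with
  | nil => exact h
  | cons a t ih =>
      simp only [List.foldl_cons]
      exact ih (f s a) (hstep s a (List.mem_cons_self) h) (fun s b hb => hstep s b (List.mem_cons_of_mem a hb))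

theorem foldl_rel {α σ τ : Type} (R : σ → τ → Prop) (f : σ → α → σ) (g : τ → α → τ)
    (l : List α) (s : σ) (t : τ) (h : R s t)
    (hstep : ∀ s t a, a ∈ l → R s t → R (f s a) (g t a)) :
    R (l.foldl f s) (l.foldl g t) := by
  induction l generalizing s t with
  | nil => exact h
  | cons a u ih =>
      simp only [List.foldl_cons]
      exact ih (f s a) (g t a) (hstep s t a (List.mem_cons_self) h) (fun s t b hb => hstep s t b (List.mem_cons_of_mem a hb))

theorem getD_set_list {α : Type} (l : List α) (i k : Nat) (a d : α) :
    (l.set i a).getD k d = if i = k ∧ i < l.length then a else l.getD k d := by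
  rw [List.getD_eq_getElem?_getD, List.getElem?_set, List.getD_eq_getElem?_getD]
  by_cases hik : i = k
  · subst hik
    by_cases hil : i < l.length
    · simp [hil]
    · simp [hil]
  · simp [hik]

theorem setCell_inv (grid g : List (List String)) (i j : Nat) (hInv : InvG grid g)
    (hgd : ((grid.getD i []).getD j "" == ".") = false) : InvG grid (setCellA g i j) := by
  obtain ⟨hlen, hrlen, hpat⟩ := hInv
  refine ⟨by simp [setCellA, hlen], ?_, ?_⟩
  · intro k
    rw [setCellA, getD_set_list]
    split
    · rename_i h; rw [List.length_set, ← h.1]; exact hrlen i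
    · exact hrlen k
  · intro k l
    rw [setCellA, getD_set_list]
    split
    · rename_i h
      obtain ⟨rfl, -⟩ := h
      rw [getD_set_list]
      split
      · rename_i h2
        obtain ⟨rfl, -⟩ := h2
        rw [hgd]; rfl
      · exact hpat i l
    · exact hpat k l

theorem markA_inv (grid g : List (List String)) (x y : Nat)
    (hInv : InvG grid g) (hchk : checkA grid x y = true) :
    InvG grid (markA g x y) := by
  have hc : ∀ mx < 20, ∀ my < 3, ((monsterA.getD my []).getD mx "" == "#") = true →
      ((grid.getD (y + my) []).getD (x + mx) "" == ".") = false := by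
    simp only [checkA, cellA, List.all_eq_true, List.mem_range, Bool.not_eq_eq_eq_not,
      Bool.not_true, Bool.and_eq_false_iff] at hchk
    intro mx hmx my hmy hst
    rcases hchk mx hmx my hmy with h | h
    · rw [hst] at h; simp at h
    · exact h
  unfold markA
  apply foldl_pres (InvG grid) _ _ _ hInv
  intro s mx hmx hs
  apply foldl_pres (InvG grid) _ _ _ hs
  intro t my hmy ht
  split
  · rename_i hst
    exact setCell_inv grid t (y + my) (x + mx) ht
      (hc mx (List.mem_range.mp hmx) my (List.mem_range.mp hmy) hst)
  · exact ht



theorem step_rel (grid : List (List String)) (x y : Nat)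
    (hn : 21 ≤ grid.length) (hx : x < grid.length - 20) (hy : y < grid.length - 3)
    (hrow : ∀ row ∈ grid.dropLast, grid.length - 1 ≤ row.length)
    (s t : List (List String) × Bool) (h2 : s.2 = t.2) (hInv : InvG grid s.1) :
    (if checkA s.1 x y then (markA s.1 x y, true) else s).2 =
      (if (List.range 3).all (fun my =>
          (((grid.map (fun row => maskB row ".")).getD (y + my) 0) >>> x) &&& (masksB.getD my 0) == masksB.getD my 0) then
        ((List.range 3).foldl (fun g my =>
            g.set (y + my) (markBitsB (g.getD (y + my) []) x (masksB.getD my 0))) t.1, true)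
      else t).2 ∧
    InvG grid (if checkA s.1 x y then (markA s.1 x y, true) else s).1 := by
  have hcond : checkA s.1 x y = (List.range 3).all (fun my =>
      (((grid.map (fun row => maskB row ".")).getD (y + my) 0) >>> x) &&& (masksB.getD my 0) == masksB.getD my 0) :=
    (checkA_congr grid s.1 hInv x y).trans (checkA_mask grid x y hn hx hy hrow)
  cases hc : checkA s.1 x y with
  | true =>
      rw [← hcond]
      simp only [hc, reduceIte]
      exact ⟨trivial, markA_inv grid s.1 x y hInv ((checkA_congr grid s.1 hInv x y).symm.trans hc)⟩
  | false =>
      rw [← hcond]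
      simp only [hc, Bool.false_eq_true, reduceIte]
      exact ⟨h2, hInv⟩

-- ===== VERDICT (by name: the statement is the Claim_ definition above) =====
theorem markmonsters_spec : Claim_equal_markmonsters := by
  intro grid _ hpre
  unfold Spec_markmonsters markmonsters markmonsters_alt
  by_cases hn : grid.length ≤ 20
  · rw [show grid.length - 20 = 0 from by omega]
    simp
  · have hn21 : 21 ≤ grid.length := by omega
    have hrow : ∀ row ∈ grid.dropLast, grid.length - 1 ≤ row.length := by
      rcases hpre with h | h
      · omega
      · exact h
    show _ = ((List.range (grid.length - 20)).foldl _ (grid, false)).2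
    suffices h : (fun (s t : List (List String) × Bool) => s.2 = t.2 ∧ InvG grid s.1)
        ((List.range (grid.length - 20)).foldl (fun s x =>
          (List.range (grid.length - 3)).foldl (fun s y =>
            if checkA s.1 x y then (markA s.1 x y, true) else s) s) (grid, false))
        ((List.range (grid.length - 20)).foldl (fun s x =>
          (List.range (grid.length - 3)).foldl (fun s y =>
            if (List.range 3).all (fun my =>
                (((grid.map (fun row => maskB row ".")).getD (y + my) 0) >>> x) &&& (masksB.getD my 0) == masksB.getD my 0) then
              ((List.range 3).foldl (fun g my =>
                  g.set (y + my) (markBitsB (g.getD (y + my) []) x (masksB.getD my 0))) s.1, true)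
            else s) s) (grid, false)) by
      exact h.1
    refine foldl_rel (fun (s t : List (List String) × Bool) => s.2 = t.2 ∧ InvG grid s.1) _ _ _ _ _ ⟨rfl, rfl, fun i => rfl, fun i j => rfl⟩ ?_
    intro s t x hx hst
    refine foldl_rel (fun (s t : List (List String) × Bool) => s.2 = t.2 ∧ InvG grid s.1) _ _ _ _ _ hst ?_
    intro s t y hy hR
    exact step_rel grid x y hn21 (List.mem_range.mp hx) (List.mem_range.mp hy) hrow s t hR.1 hR.2
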